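-- pv_equiv track=rewrite | github.com/Ridealist/CodingTest | CodingTest_문제풀이/LG유플러스_코테/애너그램.py | solution
-- ===== SOURCE A (Python) =====
-- def solution(arr):
--
--     res = []
--     for i in arr:
--         s = str(i)
--         arr_dict = {}
--         for j in s:
--             if j in arr_dict:
--                 arr_dict[j] += 1
--             else:
--                 arr_dict[j] = 1
--
--         if arr_dict in res:
--             continue
--         else:
--             res.append(arr_dict)
--     return len(res)
-- ===== SOURCE B (Python) =====
-- def solution(arr):
--     sigs = sorted(''.join(sorted(str(i))) for i in arr)
--     count = 0
--     prev = None
--     for s in sigs: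
--         if s != prev:
--             count += 1
--         prev = s
--     return count
-- ===== Notes on version B (the rewrite author's own statement) =====
-- stated objective: faster
-- what changed: A builds a per-number character-count dict and linearly scans the list of all previously kept dicts for a mapping-equal one (quadratic in the number of distinct groups); B maps each number to its canonical sorted-string signature, sorts the signature list once, and counts adjacent differences in a single pass.
import Mathlib
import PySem

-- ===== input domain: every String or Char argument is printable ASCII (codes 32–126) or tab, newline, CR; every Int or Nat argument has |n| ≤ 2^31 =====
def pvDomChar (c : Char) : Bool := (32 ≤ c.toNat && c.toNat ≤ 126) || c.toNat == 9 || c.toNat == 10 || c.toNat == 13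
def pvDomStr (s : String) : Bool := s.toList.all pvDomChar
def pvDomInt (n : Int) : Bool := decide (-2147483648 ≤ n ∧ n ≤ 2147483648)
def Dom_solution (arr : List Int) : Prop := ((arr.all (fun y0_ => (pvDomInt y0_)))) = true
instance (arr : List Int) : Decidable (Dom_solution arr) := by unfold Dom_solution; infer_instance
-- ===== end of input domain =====

-- B replaces A's linear scan over all previously seen per-number character-count dicts by sorting
-- the canonical signatures once and counting adjacent differences in a single pass (objective: faster).

-- ===== PORT A =====
-- Python dict equality (`arr_dict in res` compares dicts as MAPPINGS, ignoring insertion order):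
-- same number of keys and every item of d is mapped identically by e.
def pvDictEq (d e : PySem.Dict Char Int) : Bool :=
  (d.size == e.size) && d.items.all (fun p => e.get? p.1 == some p.2)

def solution (arr : List Int) : Int :=
  (arr.foldl (fun res i =>
      let s := PySem.Int.toChars i
      let d := s.foldl (fun d j =>
          if d.contains j then d.insert j (d.getD j 0 + 1) else d.insert j 1)
        PySem.Dict.empty
      if res.any (fun e => pvDictEq d e) then res else res ++ [d])
    ([] : List (PySem.Dict Char Int))).length

-- ===== PORT B =====
def solution_alt (arr : List Int) : Int :=
  let sigs := PySem.List.sorted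
    (arr.map (fun i => PySem.List.sorted (PySem.Int.toChars i) (fun x => x) false))
    (fun x => x) false
  (sigs.foldl (fun st s => (if some s ≠ st.2 then st.1 + 1 else st.1, some s))
    ((0 : Int), (none : Option (List Char)))).1

-- ===== PRECONDITION & SPEC =====
def Spec_solution (arr : List Int) (out : Int) : Prop := out = solution_alt arr
instance (arr : List Int) (out : Int) : Decidable (Spec_solution arr out) := by unfold Spec_solution; infer_instance

-- ===== CLAIM (what is proved, stated in full; the proofs are below) =====
def Claim_equal_solution : Prop := ∀ (arr : List Int), Dom_solution arr → Spec_solution arr (solution arr)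

-- ===== LEMMAS AND PROOFS =====

-- canonical signature: the sorted character list of str(i)
def canonC (s : List Char) : List Char := PySem.List.sorted s (fun x => x) false
def canonI (i : Int) : List Char := canonC (PySem.Int.toChars i)

-- A's inner loop builds Counter(str(i))
lemma counter_fold (s : List Char) :
    s.foldl (fun d j => if d.contains j then d.insert j (d.getD j 0 + 1) else d.insert j 1)
      PySem.Dict.empty = PySem.Dict.counter s := by
  rw [← PySem.Dict.foldl_insert_getD_add_one_eq_counter]
  congr 1
  funext d j
  by_cases h : d.contains j
  · simp [h]
  · have h' : d.contains j = false := by simpa using h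
    rw [if_neg h, PySem.Dict.getD_of_not_contains (d := d) (d0 := 0) h']
    norm_num

lemma get?_counter (t : List Char) (k : Char) :
    (PySem.Dict.counter t).get? k = if k ∈ t then some ((t.count k : Int)) else none := by
  by_cases hk : k ∈ t
  · cases h : (PySem.Dict.counter t).get? k with
    | none =>
        rw [PySem.Dict.get?_eq_none_iff_not_mem_keys] at h
        simp [PySem.Dict.keys_counter, PySem.Set.mem_ofList, hk] at h
    | some v =>
        have := PySem.Dict.getD_of_get?_eq_some (PySem.Dict.counter t) (0 : Int) h
        rw [PySem.Dict.getD_counter] at this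
        simp [hk, ← this]
  · simp only [hk, if_false]
    rw [PySem.Dict.get?_eq_none_iff_not_mem_keys]
    simp [PySem.Dict.keys_counter, PySem.Set.mem_ofList, hk]

-- Python's dict == on two Counters is exactly permutation of the counted lists
lemma pvDictEq_counter (s t : List Char) :
    pvDictEq (PySem.Dict.counter s) (PySem.Dict.counter t) = true ↔ s.Perm t := by
  unfold pvDictEq
  rw [Bool.and_eq_true, beq_iff_eq, List.all_eq_true]
  simp only [PySem.Dict.size, PySem.Dict.items_counter, List.length_map, List.mem_map]
  constructor
  · rintro ⟨hlen, hall⟩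
    have hsub : (PySem.Set.ofList s) ⊆ (PySem.Set.ofList t) := by
      intro k hk
      have := hall _ ⟨k, hk, rfl⟩
      rw [get?_counter] at this
      by_cases hkt : k ∈ t
      · simpa [PySem.Set.mem_ofList]
      · simp [hkt] at this
    have hperm : (PySem.Set.ofList s).Perm (PySem.Set.ofList t) :=
      (List.subperm_of_subset (PySem.Set.nodup_ofList _) hsub).perm_of_length_le (le_of_eq hlen.symm)
    rw [List.perm_iff_count]
    intro a
    by_cases ha : a ∈ s
    · have := hall _ ⟨a, (PySem.Set.mem_ofList s a).mpr ha, rfl⟩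
      rw [get?_counter] at this
      by_cases hat : a ∈ t
      · simp only [hat, if_true, Option.some.injEq, beq_iff_eq] at this
        exact_mod_cast this.symm
      · simp [hat] at this
    · have hat : a ∉ t := by
        intro hat
        exact ha ((PySem.Set.mem_ofList s a).mp (hperm.mem_iff.mpr ((PySem.Set.mem_ofList t a).mpr hat)))
      simp [List.count_eq_zero_of_not_mem, ha, hat]
  · intro hp
    constructor
    · apply List.Perm.length_eq
      rw [List.perm_ext_iff_of_nodup (PySem.Set.nodup_ofList _) (PySem.Set.nodup_ofList _)]
      intro a
      simp [PySem.Set.mem_ofList, hp.mem_iff]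
    · rintro p ⟨k, hk, rfl⟩
      rw [get?_counter]
      have hks : k ∈ s := (PySem.Set.mem_ofList s k).mp hk
      have hkt : k ∈ t := hp.mem_iff.mp hks
      simp [hkt, List.perm_iff_count.mp hp k]

-- A's membership test fires exactly when the canonical signature was seen before
lemma match_iff (s : List Char) (ss : List (List Char)) :
    ((ss.map (fun t => PySem.Dict.counter t)).any
      (fun e => pvDictEq (PySem.Dict.counter s) e) = true) ↔ canonC s ∈ ss.map canonC := by
  rw [List.any_map, List.any_eq_true]
  simp only [Function.comp, pvDictEq_counter, List.mem_map]
  constructor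
  · rintro ⟨t, ht, hp⟩
    exact ⟨t, ht, ((PySem.List.sorted_id_eq_sorted_id_iff_perm s t).mpr hp).symm⟩
  · rintro ⟨t, ht, he⟩
    exact ⟨t, ht, (PySem.List.sorted_id_eq_sorted_id_iff_perm s t).mp he.symm⟩

-- invariant of A's outer loop: res holds one Counter per distinct canonical signature, in first-seen order
lemma loopA (arr : List Int) : ∀ (ss : List (List Char)),
    (arr.foldl (fun res i =>
        if res.any (fun e => pvDictEq (PySem.Dict.counter (PySem.Int.toChars i)) e) then res
        else res ++ [PySem.Dict.counter (PySem.Int.toChars i)])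
      (ss.map (fun t => PySem.Dict.counter t))).length
    = (PySem.Set.update (ss.map canonC) (arr.map canonI)).length := by
  induction arr with
  | nil => intro ss; simp [PySem.Set.update_nil]
  | cons i rest ih =>
      intro ss
      simp only [List.foldl_cons, List.map_cons, PySem.Set.update_cons]
      by_cases h : (ss.map (fun t => PySem.Dict.counter t)).any
          (fun e => pvDictEq (PySem.Dict.counter (PySem.Int.toChars i)) e) = true
      · rw [if_pos h]
        have hmem : canonI i ∈ ss.map canonC := (match_iff _ ss).mp h
        rw [PySem.Set.add_of_mem hmem]
        exact ih ss
      · rw [if_neg h]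
        have hmem : canonI i ∉ ss.map canonC := fun hm => h ((match_iff _ ss).mpr hm)
        rw [PySem.Set.add_of_not_mem hmem]
        have h1 : (ss.map (fun t => PySem.Dict.counter t)) ++ [PySem.Dict.counter (PySem.Int.toChars i)]
            = (ss ++ [PySem.Int.toChars i]).map (fun t => PySem.Dict.counter t) := by simp
        have h2 : ss.map canonC ++ [canonI i] = (ss ++ [PySem.Int.toChars i]).map canonC := by simp [canonI]
        rw [h1, h2]
        exact ih (ss ++ [PySem.Int.toChars i])

lemma aB (arr : List Int) :
    solution arr = ((PySem.Set.ofList (arr.map canonI)).length : Int) := by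
  unfold solution
  have hstep : (fun (res : List (PySem.Dict Char Int)) (i : Int) =>
      let s := PySem.Int.toChars i
      let d := s.foldl (fun d j =>
          if d.contains j then d.insert j (d.getD j 0 + 1) else d.insert j 1)
        PySem.Dict.empty
      if res.any (fun e => pvDictEq d e) then res else res ++ [d])
    = (fun res i =>
        if res.any (fun e => pvDictEq (PySem.Dict.counter (PySem.Int.toChars i)) e) then res
        else res ++ [PySem.Dict.counter (PySem.Int.toChars i)]) := by
    funext res i
    simp only [counter_fold]
  rw [hstep]
  have h1 := loopA arr []
  simp only [List.map_nil] at h1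
  rw [PySem.Set.update_nil_left] at h1
  exact_mod_cast h1

lemma length_discard {α : Type} [BEq α] [LawfulBEq α] (s : List α) (hnd : s.Nodup) (x : α) :
    (((PySem.Set.discard s x).length : Int)) = (s.length : Int) - (if x ∈ s then 1 else 0) := by
  induction s with
  | nil => simp [PySem.Set.discard]
  | cons a s ih =>
      have has : a ∉ s := (List.nodup_cons.mp hnd).1
      have ih' := ih (List.nodup_cons.mp hnd).2
      by_cases hax : a = x
      · subst hax
        have hfil : PySem.Set.discard (a :: s) a = s := by
          simp only [PySem.Set.discard, List.filter_cons]
          simp only [beq_self_eq_true, Bool.not_true]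
          exact List.filter_eq_self.mpr (fun y hy => by
            simp only [Bool.not_eq_eq_eq_not, Bool.not_true, beq_eq_false_iff_ne, ne_eq]
            rintro rfl; exact has hy)
        rw [hfil]
        simp [has]
      · have hthis : PySem.Set.discard (a :: s) x = a :: PySem.Set.discard s x := by
          simp [PySem.Set.discard, hax]
        rw [hthis]
        have hne : ¬ x = a := fun e => hax e.symm
        by_cases hxs : x ∈ s
        · simp only [hxs, if_pos] at ih'
          simp only [List.length_cons, List.mem_cons, hxs, or_true, if_pos]
          push_cast at ih' ⊢
          omega
        · simp only [hxs, if_neg, not_false_iff] at ih'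
          have hx2 : x ∉ a :: s := by simp [hne, hxs]
          simp only [List.length_cons, hx2, if_neg, not_false_iff]
          push_cast at ih' ⊢
          omega

lemma ofList_length_perm {α : Type} [BEq α] [LawfulBEq α] {l₁ l₂ : List α} (h : l₁.Perm l₂) :
    (PySem.Set.ofList l₁).length = (PySem.Set.ofList l₂).length := by
  apply List.Perm.length_eq
  rw [List.perm_ext_iff_of_nodup (PySem.Set.nodup_ofList _) (PySem.Set.nodup_ofList _)]
  intro a
  simp [PySem.Set.mem_ofList, h.mem_iff]

-- B's loop over a ≤-sorted tail counts the distinct elements not already counted as p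
lemma dcB (xs : List (List Char)) : ∀ (c : Int) (p : List Char),
    List.Pairwise (· ≤ ·) xs → (∀ y ∈ xs, p ≤ y) →
    (xs.foldl (fun st s => (if some s ≠ st.2 then st.1 + 1 else st.1, some s)) (c, some p)).1
      = c + ((PySem.Set.ofList xs).length : Int) - (if p ∈ xs then 1 else 0) := by
  induction xs with
  | nil => intro c p _ _; simp [PySem.Set.ofList]
  | cons x rest ih =>
      intro c p hpw hp
      have hx : ∀ y ∈ rest, x ≤ y := fun y hy => (List.pairwise_cons.mp hpw).1 y hy
      have hrest : List.Pairwise (· ≤ ·) rest := (List.pairwise_cons.mp hpw).2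
      have hlen : ((PySem.Set.ofList (x :: rest)).length : Int)
          = 1 + ((PySem.Set.ofList rest).length : Int) - (if x ∈ rest then 1 else 0) := by
        rw [PySem.Set.ofList_cons]
        simp only [List.length_cons]
        have := length_discard (PySem.Set.ofList rest) (PySem.Set.nodup_ofList rest) x
        push_cast
        rw [this]
        simp [PySem.Set.mem_ofList]
        ring
      simp only [List.foldl_cons]
      by_cases hxp : x = p
      · subst hxp
        rw [if_neg (by simp)]
        rw [ih c x hrest hx]
        rw [hlen]
        simp [List.mem_cons]
        omega
      · rw [if_pos (show (some x ≠ some p) by simpa using hxp)]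
        rw [ih (c + 1) x hrest hx]
        have hpnot : p ∉ x :: rest := by
          intro hm
          rcases List.mem_cons.mp hm with h1 | h1
          · exact hxp h1.symm
          · exact hxp (le_antisymm (hx p h1) (hp x List.mem_cons_self))
        rw [if_neg hpnot, hlen]
        omega

lemma altB (arr : List Int) :
    solution_alt arr = ((PySem.Set.ofList (arr.map canonI)).length : Int) := by
  have h0 : solution_alt arr = ((PySem.List.sorted (arr.map canonI) (fun x => x) false).foldl
      (fun st s => (if some s ≠ st.2 then st.1 + 1 else st.1, some s))
      ((0 : Int), (none : Option (List Char)))).1 := rfl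
  have hperm : (PySem.List.sorted (arr.map canonI) (fun x => x) false).Perm (arr.map canonI) :=
    PySem.List.sorted_perm _ _ _
  rw [h0, ofList_length_perm hperm.symm]
  cases hs : PySem.List.sorted (arr.map canonI) (fun x => x) false with
  | nil => simp [PySem.Set.ofList]
  | cons x rest =>
      have hpw2 : List.Pairwise (fun a b : List Char => a ≤ b) (x :: rest) := by
        rw [← hs]
        have h := PySem.List.sorted_pairwise (arr.map canonI) (fun x => x)
        have e : (@PySem.List.sorted (List Char) (List Char) List.instLinearOrder.toLT
            LinearOrder.toDecidableLT (arr.map canonI) (fun x => x) false)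
            = PySem.List.sorted (arr.map canonI) (fun x => x) false := by congr
        rw [e] at h
        exact h
      simp only [List.foldl_cons, if_pos (by simp : some x ≠ none)]
      rw [dcB rest (0 + 1) x (List.pairwise_cons.mp hpw2).2 (List.pairwise_cons.mp hpw2).1]
      rw [PySem.Set.ofList_cons]
      have := length_discard (PySem.Set.ofList rest) (PySem.Set.nodup_ofList rest) x
      simp only [List.length_cons]
      push_cast
      rw [this]
      simp [PySem.Set.mem_ofList]
      omega

-- ===== VERDICT (by name: the statement is the Claim_ definition above) =====
theorem solution_spec : Claim_equal_solution := by
  intro arr _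
  unfold Spec_solution
  rw [aB, altB]
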